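-- pv_equiv track=rewrite | github.com/lukebiggerstaff/Lagunita-Algorithms | np-complete/tsp.py | initialize_subproblem_matrix
-- ===== SOURCE A (Python) =====
-- from itertools import combinations
--
-- def initialize_subproblem_matrix(data):
--     sub = dict()
--     n = len(data)
--     sub[(0,)] = {0 : 0}
--     for m in range(1,n):
--         for i in combinations(range(1,n),m):
--             tup_s = (0,) + i
--             sub[tup_s] = {0 : 10 ** 20}
--     return sub
-- ===== SOURCE B (Python) =====
-- def initialize_subproblem_matrix(data):
--     n = len(data)
--     result = {(0,): {0: 0}}
--     level = [(0,)]
--     while True: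
--         nxt = [s + (v,) for s in level for v in range(s[-1] + 1, n)]
--         if not nxt:
--             break
--         for s in nxt:
--             result[s] = {0: 10 ** 20}
--         level = nxt
--     return result
-- ===== Notes on version B (the rewrite author's own statement) =====
-- stated objective: alternative
-- what changed: B replaces the cardinality loop over itertools.combinations with a level-by-level BFS: each subset tuple of the previous level is extended by every vertex larger than its last element, producing the same subsets in the same insertion order.
import Mathlib
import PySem

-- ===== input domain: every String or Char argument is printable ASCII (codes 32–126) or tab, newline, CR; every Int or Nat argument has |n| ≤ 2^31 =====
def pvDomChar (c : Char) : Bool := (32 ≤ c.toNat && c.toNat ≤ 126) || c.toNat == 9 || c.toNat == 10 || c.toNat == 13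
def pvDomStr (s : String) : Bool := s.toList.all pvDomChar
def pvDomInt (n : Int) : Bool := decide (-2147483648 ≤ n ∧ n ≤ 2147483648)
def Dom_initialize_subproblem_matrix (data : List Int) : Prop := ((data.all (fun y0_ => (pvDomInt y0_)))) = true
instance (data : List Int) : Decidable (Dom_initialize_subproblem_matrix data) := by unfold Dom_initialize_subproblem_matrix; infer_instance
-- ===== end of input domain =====

-- B initializes the same TSP table by level-by-level subset extension instead of
-- itertools.combinations grouped by cardinality; same output, same insertion order (objective: alternative).

-- ===== PORT A =====
-- exact port of itertools.combinations(pool, m): lexicographic index order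
def pvCombs : Nat → List Int → List (List Int)
  | 0, _ => [[]]
  | _ + 1, [] => []
  | m + 1, x :: xs => (pvCombs m xs).map (fun c => x :: c) ++ pvCombs (m + 1) xs

def initialize_subproblem_matrix (data : List Int) : List (List Int × List (Int × Int)) :=
  let n : Int := data.length
  -- sub = dict(); sub[(0,)] = {0: 0}
  let sub : PySem.Dict (List Int) (List (Int × Int)) :=
    PySem.Dict.insert PySem.Dict.empty [0] [(0, 0)]
  -- for m in range(1, n): for i in combinations(range(1, n), m): sub[(0,)+i] = {0: 10**20}
  -- (m ranges over 1..n-1, so m ≥ 1 and m.toNat is exact)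
  let sub := (PySem.List.pyRange 1 n 1).foldl (fun sub m =>
      (pvCombs m.toNat (PySem.List.pyRange 1 n 1)).foldl
        (fun sub c => sub.insert (0 :: c) [(0, 10 ^ 20)]) sub) sub
  sub.items

-- ===== PORT B =====
-- one level step: [s + (v,) for v in range(s[-1] + 1, n)]; s is always nonempty (starts at (0,)),
-- so pyGet? s (-1) is some and the .getD 0 default is never used
def pvExtendRow (n : Int) (s : List Int) : List (List Int) :=
  (PySem.List.pyRange ((PySem.List.pyGet? s (-1)).getD 0 + 1) n 1).map (fun v => s ++ [v])

-- the 'while True' loop of B; it performs at most len(data) iterations (levels are subsets of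
-- {0..n-1}, so they die out), hence fuel len(data)+1 makes the port exact
def pvLoop : Nat → PySem.Dict (List Int) (List (Int × Int)) → List (List Int) → Int →
    PySem.Dict (List Int) (List (Int × Int))
  | 0, res, _, _ => res
  | fuel + 1, res, level, n =>
    let nxt := level.flatMap (pvExtendRow n)
    if nxt = [] then res
    else pvLoop fuel (nxt.foldl (fun r s => r.insert s [(0, 10 ^ 20)]) res) nxt n

def initialize_subproblem_matrix_alt (data : List Int) : List (List Int × List (Int × Int)) :=
  let n : Int := data.length
  let res : PySem.Dict (List Int) (List (Int × Int)) :=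
    PySem.Dict.insert PySem.Dict.empty [0] [(0, 0)]
  (pvLoop (data.length + 1) res [[0]] n).items

-- ===== PRECONDITION & SPEC =====
def Spec_initialize_subproblem_matrix (data : List Int) (out : List (List Int × List (Int × Int))) : Prop := out = initialize_subproblem_matrix_alt data
instance (data : List Int) (out : List (List Int × List (Int × Int))) : Decidable (Spec_initialize_subproblem_matrix data out) := by unfold Spec_initialize_subproblem_matrix; infer_instance

-- ===== CLAIM (what is proved, stated in full; the proofs are below) =====
def Claim_equal_initialize_subproblem_matrix : Prop := ∀ (data : List Int), Dom_initialize_subproblem_matrix data → Spec_initialize_subproblem_matrix data (initialize_subproblem_matrix data)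

-- ===== LEMMAS AND PROOFS =====

theorem pvCombs_zero (l : List Int) : pvCombs 0 l = [[]] := by
  cases l <;> rfl

theorem pvCombs_eq_nil_iff (l : List Int) : ∀ m : Nat, pvCombs m l = [] ↔ l.length < m := by
  induction l with
  | nil => intro m; cases m <;> simp [pvCombs]
  | cons x xs ih =>
    intro m
    cases m with
    | zero => simp [pvCombs]
    | succ m =>
      simp only [pvCombs, List.append_eq_nil_iff, List.map_eq_nil_iff, ih, List.length_cons]
      omega

theorem pvCombs_length_mem : ∀ (l : List Int) (m : Nat) (c : List Int),
    c ∈ pvCombs m l → c.length = m := by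
  intro l
  induction l with
  | nil =>
    intro m c h
    cases m with
    | zero => simp [pvCombs] at h; simp [h]
    | succ m => simp [pvCombs] at h
  | cons x xs ih =>
    intro m c h
    cases m with
    | zero => simp [pvCombs] at h; simp [h]
    | succ m =>
      simp only [pvCombs, List.mem_append, List.mem_map] at h
      rcases h with ⟨c', hc', rfl⟩ | h
      · simp [ih _ _ hc']
      · exact ih _ _ h

theorem pvCombs_one (l : List Int) : pvCombs 1 l = l.map (fun v => [v]) := by
  induction l with
  | nil => simp [pvCombs]
  | cons x xs ih => simp [pvCombs, ih]

theorem pvCombs_step (n : Int) : ∀ (k : Nat) (a : Int) (m : Nat), (n - a).toNat = k →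
    (pvCombs m (PySem.List.pyRange a n 1)).flatMap
      (fun c => (PySem.List.pyRange (c.getLastD (a - 1) + 1) n 1).map (fun v => c ++ [v]))
    = pvCombs (m + 1) (PySem.List.pyRange a n 1) := by
  intro k
  induction k with
  | zero =>
    intro a m hk
    have hnil : PySem.List.pyRange a n 1 = [] := PySem.List.pyRange_one_eq_nil (by omega)
    rw [hnil]
    cases m with
    | zero =>
      simp [pvCombs, hnil]
    | succ m => simp [pvCombs]
  | succ k ih =>
    intro a m hk
    have hlt : a < n := by omega
    have hcons : PySem.List.pyRange a n 1 = a :: PySem.List.pyRange (a + 1) n 1 :=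
      PySem.List.pyRange_one_cons hlt
    have hk' : (n - (a + 1)).toNat = k := by omega
    cases m with
    | zero =>
      rw [pvCombs_one, pvCombs_zero]
      simp only [List.flatMap_cons, List.flatMap_nil, List.append_nil, List.getLastD_nil]
      rw [show a - 1 + 1 = a by ring]
      simp
    | succ m =>
      rw [hcons]
      show (((pvCombs m (PySem.List.pyRange (a + 1) n 1)).map (fun c => a :: c)
              ++ pvCombs (m + 1) (PySem.List.pyRange (a + 1) n 1)).flatMap _)
          = ((pvCombs (m + 1) (PySem.List.pyRange (a + 1) n 1)).map (fun c => a :: c)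
              ++ pvCombs (m + 2) (PySem.List.pyRange (a + 1) n 1))
      rw [List.flatMap_append, List.flatMap_map]
      have ihm := ih (a + 1) m hk'
      have ihm1 := ih (a + 1) (m + 1) hk'
      rw [show a + 1 - 1 = a by ring] at ihm ihm1
      congr 1
      · rw [List.flatMap_congr (g := fun c =>
            ((PySem.List.pyRange (c.getLastD a + 1) n 1).map (fun v => c ++ [v])).map
              (fun l => a :: l)) ?_]
        · rw [← List.map_flatMap, ihm]
        · intro c hc
          simp [List.getLast?_cons, List.map_map, Function.comp_def]
      · rw [← ihm1]
        apply List.flatMap_congr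
        intro c hc
        have hlen := pvCombs_length_mem _ _ _ hc
        cases c with
        | nil => simp at hlen
        | cons y t => simp [List.getLast?_cons]

def pvLevel (n : Int) (m : Nat) : List (List Int) :=
  (pvCombs m (PySem.List.pyRange 1 n 1)).map (fun c => 0 :: c)

theorem pvExtend_cons (n : Int) (c : List Int) :
    pvExtendRow n (0 :: c)
    = (PySem.List.pyRange (c.getLastD 0 + 1) n 1).map (fun v => 0 :: (c ++ [v])) := by
  unfold pvExtendRow
  rw [PySem.List.pyGet?_neg_one]
  simp [List.getLast?_cons, ← List.getLastD_eq_getLast?]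

theorem pvLevel_step (n : Int) (m : Nat) :
    (pvLevel n m).flatMap (pvExtendRow n) = pvLevel n (m + 1) := by
  unfold pvLevel
  rw [List.flatMap_map]
  rw [List.flatMap_congr (g := fun c =>
      ((PySem.List.pyRange (c.getLastD 0 + 1) n 1).map (fun v => c ++ [v])).map
        (fun l => (0 : Int) :: l)) ?_]
  · rw [← List.map_flatMap]
    have h := pvCombs_step n (n - 1).toNat 1 m rfl
    rw [show (1 : Int) - 1 = 0 by ring] at h
    rw [h]
  · intro c hc
    rw [pvExtend_cons]
    simp [List.map_map, Function.comp_def]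

theorem pvFoldl_id {a b : Type} (l : List b) (f : a → b → a) (init : a)
    (h : ∀ acc x, x ∈ l → f acc x = acc) : l.foldl f init = init := by
  induction l generalizing init with
  | nil => rfl
  | cons x xs ih =>
    rw [List.foldl_cons, h init x (by simp)]
    exact ih init (fun acc y hy => h acc y (by simp [hy]))

theorem pvLoop_eq (n : Int) : ∀ (fuel m : Nat)
    (d : PySem.Dict (List Int) (List (Int × Int))), n ≤ (fuel : Int) + m + 1 →
    pvLoop fuel d (pvLevel n m) n
    = (PySem.List.pyRange ((m : Int) + 1) n 1).foldl (fun d mm =>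
        (pvCombs mm.toNat (PySem.List.pyRange 1 n 1)).foldl
          (fun d c => d.insert (0 :: c) [(0, 10 ^ 20)]) d) d := by
  intro fuel
  induction fuel with
  | zero =>
    intro m d h
    rw [PySem.List.pyRange_one_eq_nil (show n ≤ (m : Int) + 1 by push_cast at h; omega)]
    rfl
  | succ fuel ih =>
    intro m d h
    have hstep := pvLevel_step n m
    have hlen : (PySem.List.pyRange 1 n 1).length = (n - 1).toNat :=
      PySem.List.length_pyRange_one 1 n
    by_cases hemp : pvCombs (m + 1) (PySem.List.pyRange 1 n 1) = []
    · have hnil : (pvLevel n m).flatMap (pvExtendRow n) = [] := by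
        rw [hstep]; unfold pvLevel; rw [hemp]; rfl
      have hL : pvLoop (fuel + 1) d (pvLevel n m) n = d := by
        simp only [pvLoop, hnil, if_pos]
      rw [hL]
      symm
      have hlenlt := (pvCombs_eq_nil_iff (PySem.List.pyRange 1 n 1) (m + 1)).mp hemp
      apply pvFoldl_id
      intro acc mm hmm
      have h1 : (m : Int) + 1 ≤ mm := (PySem.List.mem_pyRange_one.mp hmm).1
      have hc : pvCombs mm.toNat (PySem.List.pyRange 1 n 1) = [] := by
        rw [pvCombs_eq_nil_iff]; omega
      rw [hc]; rfl
    · have hm2 : (m : Int) + 2 ≤ n := by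
        have hge : ¬ (PySem.List.pyRange 1 n 1).length < m + 1 :=
          fun hl => hemp ((pvCombs_eq_nil_iff _ _).mpr hl)
        omega
      have hemp' : pvLevel n (m + 1) ≠ [] := by
        unfold pvLevel; simp [hemp]
      have hL : pvLoop (fuel + 1) d (pvLevel n m) n
          = pvLoop fuel ((pvLevel n (m + 1)).foldl
              (fun r s => r.insert s [(0, 10 ^ 20)]) d) (pvLevel n (m + 1)) n := by
        simp only [pvLoop, hstep, if_neg hemp']
      rw [hL]
      have hins : (pvLevel n (m + 1)).foldl (fun r s => r.insert s [(0, 10 ^ 20)]) d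
          = (pvCombs (m + 1) (PySem.List.pyRange 1 n 1)).foldl
              (fun r c => r.insert ((0 : Int) :: c) [(0, 10 ^ 20)]) d := by
        unfold pvLevel; rw [List.foldl_map]
      rw [hins, ih (m + 1) _ (by push_cast at h ⊢; omega)]
      symm
      rw [PySem.List.pyRange_one_cons (show (m : Int) + 1 < n by omega), List.foldl_cons]
      rw [show ((m : Nat) + 1 : Nat) = ((m : Int) + 1).toNat by omega]
      rw [show (((m : Int) + 1).toNat : Int) + 1 = (m : Int) + 1 + 1 by omega]

-- ===== VERDICT (by name: the statement is the Claim_ definition above) =====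
theorem initialize_subproblem_matrix_spec : Claim_equal_initialize_subproblem_matrix := by
  intro data _
  unfold Spec_initialize_subproblem_matrix initialize_subproblem_matrix
    initialize_subproblem_matrix_alt
  show (List.foldl
      (fun sub m => List.foldl (fun sub c => sub.insert (0 :: c) [(0, 10 ^ 20)]) sub
        (pvCombs m.toNat (PySem.List.pyRange 1 (data.length : Int) 1)))
      (PySem.Dict.empty.insert [0] [(0, 0)]) (PySem.List.pyRange 1 (data.length : Int) 1)).items
    = (pvLoop (data.length + 1) (PySem.Dict.empty.insert [0] [(0, 0)]) [[0]]
        (data.length : Int)).items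
  have h0 : ([[0]] : List (List Int)) = pvLevel (data.length : Int) 0 := by
    unfold pvLevel; rw [pvCombs_zero]; rfl
  rw [h0, pvLoop_eq (data.length : Int) (data.length + 1) 0 _ (by push_cast; omega)]
  norm_num
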